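-- pv_equiv track=rewrite | github.com/ashishk1331/cassidyAskedMe | Days/371.py | minLaundryLoads
-- ===== SOURCE A (Python) =====
-- from collections import defaultdict
--
-- fabric_sorter = {
--     "normal": 0,  # N
--     "heavy": 1,  # H
--     "delicate": 2,  # D
-- }
--
-- def minLaundryLoads(load) -> int:
--     # fabric types                N  H  D
--     legend = defaultdict(lambda: [0, 0, 0])
--
--     for C, F in load:
--         legend[C][fabric_sorter[F]] += 1
--
--     T = 0
--
--     for [N, H, D] in legend.values():
--         if N or H:
--             T += 1
--         if D:
--             T += 1
--
--     return T
-- ===== SOURCE B (Python) =====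
-- fabric_sorter = {
--     "normal": 0,  # N
--     "heavy": 1,  # H
--     "delicate": 2,  # D
-- }
--
-- def minLaundryLoads(load) -> int:
--     seen = set()
--     for C, F in load:
--         idx = fabric_sorter[F]
--         seen.add((C, 1 if idx == 2 else 0))
--     return len(seen)
-- ===== Notes on version B (the rewrite author's own statement) =====
-- stated objective: simpler
-- what changed: Replaces the defaultdict of per-color [N,H,D] count lists plus a second tallying loop over values with a single pass that records presence of (color, bucket) pairs in a set and returns its size.
import Mathlib
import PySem

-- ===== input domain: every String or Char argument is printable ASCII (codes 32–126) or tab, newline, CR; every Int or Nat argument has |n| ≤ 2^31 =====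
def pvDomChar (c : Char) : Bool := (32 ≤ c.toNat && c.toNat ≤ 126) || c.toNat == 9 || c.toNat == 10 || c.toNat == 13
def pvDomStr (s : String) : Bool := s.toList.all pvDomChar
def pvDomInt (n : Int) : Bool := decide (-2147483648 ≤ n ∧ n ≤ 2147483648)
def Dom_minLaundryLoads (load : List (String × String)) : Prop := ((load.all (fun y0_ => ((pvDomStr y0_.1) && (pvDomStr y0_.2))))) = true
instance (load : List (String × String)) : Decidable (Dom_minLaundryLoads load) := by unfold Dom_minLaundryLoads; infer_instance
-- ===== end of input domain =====

-- B replaces A's defaultdict of per-color [N,H,D] count lists plus a second tallying loop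
-- with a single pass recording presence of (color, bucket) pairs in a set; objective: simpler.

-- ===== PORT A =====
-- module constant fabric_sorter
def fabricSorter : PySem.Dict String Int :=
  PySem.Dict.ofList [("normal", 0), ("heavy", 1), ("delicate", 2)]

-- legend[C][idx] += 1 : update the count list at position idx (inside Pre_, idx ∈ {0,1,2}
-- and the list has length 3, so List.set/getD are exact for Python's list indexing here)
def bumpAt (xs : List Int) (idx : Int) : List Int :=
  xs.set idx.toNat (xs.getD idx.toNat 0 + 1)

-- the body of A's second loop: if N or H: T += 1 ; if D: T += 1
def tallyStep (T : Int) (v : List Int) : Int :=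
  match v with
  | [n, h, d] =>
      let T := if n ≠ 0 ∨ h ≠ 0 then T + 1 else T
      if d ≠ 0 then T + 1 else T
  | _ => T  -- unreachable: legend's values are always 3-element lists

def minLaundryLoads (load : List (String × String)) : Int :=
  let legend := load.foldl
    (fun (d : PySem.Dict String (List Int)) p =>
      let idx := (PySem.Dict.get? fabricSorter p.2).getD 0  -- KeyError outside Pre_
      d.insert p.1 (bumpAt (d.getD p.1 [0, 0, 0]) idx))
    PySem.Dict.empty
  (PySem.Dict.values legend).foldl tallyStep 0

-- ===== PORT B =====
def minLaundryLoads_alt (load : List (String × String)) : Int :=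
  let seen := load.foldl
    (fun (s : PySem.Set (String × Int)) p =>
      let idx := (PySem.Dict.get? fabricSorter p.2).getD 0  -- KeyError outside Pre_
      PySem.Set.add s (p.1, if idx == 2 then 1 else 0))
    PySem.Set.empty
  (PySem.Set.len seen : Int)

-- ===== PRECONDITION & SPEC =====
-- Pre_ excludes loads mentioning a fabric other than normal/heavy/delicate, on which the
-- Python raises KeyError (in both A and B).
def Pre_minLaundryLoads (load : List (String × String)) : Prop :=
  ∀ p ∈ load, p.2 = "normal" ∨ p.2 = "heavy" ∨ p.2 = "delicate"
instance (load : List (String × String)) : Decidable (Pre_minLaundryLoads load) := by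
  unfold Pre_minLaundryLoads; infer_instance

def pvWitness_minLaundryLoads : (List (String × String)) :=
  [("shirt", "normal"), ("shirt", "delicate"), ("sock", "heavy")]

def Spec_minLaundryLoads (load : List (String × String)) (out : Int) : Prop := out = minLaundryLoads_alt load
instance (load : List (String × String)) (out : Int) : Decidable (Spec_minLaundryLoads load out) := by unfold Spec_minLaundryLoads; infer_instance

-- ===== CLAIM (what is proved, stated in full; the proofs are below) =====
def Claim_equal_minLaundryLoads : Prop := ∀ (load : List (String × String)), Dom_minLaundryLoads load → Pre_minLaundryLoads load → Spec_minLaundryLoads load (minLaundryLoads load)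

-- ===== LEMMAS AND PROOFS =====

-- the contribution of one count list to A's total
def tally (v : List Int) : Int :=
  match v with
  | [n, h, d] => (if n ≠ 0 ∨ h ≠ 0 then (1:Int) else 0) + (if d ≠ 0 then (1:Int) else 0)
  | _ => 0

lemma tallyStep_eq (T : Int) (v : List Int) : tallyStep T v = T + tally v := by
  rcases v with _ | ⟨n, _ | ⟨h, _ | ⟨d, _ | _⟩⟩⟩ <;>
    (simp [tallyStep, tally]; try (split_ifs <;> ring))

def sumT (d : PySem.Dict String (List Int)) : Int :=
  ((PySem.Dict.values d).map tally).sum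

lemma foldl_tallyStep (l : List (List Int)) (T : Int) :
    l.foldl tallyStep T = T + (l.map tally).sum := by
  induction l generalizing T with
  | nil => simp
  | cons v t ih => simp [List.foldl_cons, tallyStep_eq, ih]; ring

-- one value replaced in an assoc list with nodup keys
lemma sum_map_update {κ : Type} [BEq κ] [LawfulBEq κ]
    (l : List (κ × List Int)) (C : κ) (v old : List Int)
    (hnd : (l.map (·.1)).Nodup) (hmem : (C, old) ∈ l) :
    ((l.map (fun p => if p.1 == C then (C, v) else p)).map (fun p => tally p.2)).sum
      = (l.map (fun p => tally p.2)).sum - tally old + tally v := by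
  induction l with
  | nil => simp at hmem
  | cons q t ih =>
    simp only [List.map_cons, List.nodup_cons] at hnd ⊢
    rcases List.mem_cons.mp hmem with h | h
    · subst h
      have hnt : ∀ p ∈ t, p.1 ≠ C := by
        intro p hp hpC
        exact hnd.1 (by simpa [← hpC] using List.mem_map_of_mem (f := (·.1)) hp)
      have ht : t.map (fun p => if p.1 == C then (C, v) else p) = t := by
        conv_rhs => rw [← List.map_id t]
        exact List.map_congr_left (fun p hp => by simp [hnt p hp])
      simp [ht]; ring
    · have hq : q.1 ≠ C := by
        rintro rfl
        exact hnd.1 (by simpa using List.mem_map_of_mem (f := (·.1)) h)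
      simp only [List.sum_cons, ih hnd.2 h, hq, beq_iff_eq, if_false]
      ring

abbrev StepA := fun (d : PySem.Dict String (List Int)) (p : String × String) =>
  d.insert p.1 (bumpAt (d.getD p.1 [0, 0, 0]) ((PySem.Dict.get? fabricSorter p.2).getD 0))
abbrev StepB := fun (s : PySem.Set (String × Int)) (p : String × String) =>
  PySem.Set.add s (p.1, if ((PySem.Dict.get? fabricSorter p.2).getD 0) == 2 then 1 else 0)

-- the joint loop invariant
structure LoadInv (d : PySem.Dict String (List Int)) (s : PySem.Set (String × Int)) : Prop where
  hkeys : (PySem.Dict.keys d).Nodup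
  hnodup : s.Nodup
  hval : ∀ C v, PySem.Dict.get? d C = some v →
    ∃ n h dd, v = [n, h, dd] ∧ 0 ≤ n ∧ 0 ≤ h ∧ 0 ≤ dd ∧
      ((C, (0:Int)) ∈ s ↔ (n ≠ 0 ∨ h ≠ 0)) ∧ ((C, (1:Int)) ∈ s ↔ dd ≠ 0)
  hseen : ∀ q ∈ s, PySem.Dict.contains d q.1 = true
  hsum : sumT d = (s.length : Int)

lemma sumT_insert (d : PySem.Dict String (List Int)) (C : String) (v' : List Int)
    (hk : (PySem.Dict.keys d).Nodup) :
    sumT (PySem.Dict.insert d C v')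
      = sumT d - tally (PySem.Dict.getD d C [0, 0, 0]) + tally v' := by
  have hk' : (d.items.map (·.1)).Nodup := by simpa [PySem.Dict.keys] using hk
  by_cases hcon : PySem.Dict.contains d C = true
  · have hsome : ∃ old, PySem.Dict.get? d C = some old := by
      rw [PySem.Dict.contains_eq_isSome_get?] at hcon
      exact Option.isSome_iff_exists.mp hcon
    obtain ⟨old, hold⟩ := hsome
    have hmem := PySem.Dict.mem_items_of_get?_eq_some d hold
    rw [PySem.Dict.getD_of_get?_eq_some d _ hold]
    simp only [sumT, PySem.Dict.values, PySem.Dict.items_insert_of_contains d v' hcon,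
      List.map_map]
    have := sum_map_update d.items C v' old hk' hmem
    simpa [Function.comp] using this
  · simp only [Bool.not_eq_true] at hcon
    rw [PySem.Dict.getD_of_not_contains d _ hcon]
    simp only [sumT, PySem.Dict.values, PySem.Dict.items_insert_of_not_contains d v' hcon]
    simp [tally]
    try ring

lemma len_add (s : PySem.Set (String × Int)) (x : String × Int) :
    (((PySem.Set.add s x).length : Int)) = (s.length : Int) + (if x ∈ s then 0 else 1) := by
  rw [PySem.Set.add_eq_ite]
  split_ifs <;> simp

lemma bumpAt_zero (n h d : Int) : bumpAt [n, h, d] 0 = [n + 1, h, d] := rfl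
lemma bumpAt_one (n h d : Int) : bumpAt [n, h, d] 1 = [n, h + 1, d] := rfl
lemma bumpAt_two (n h d : Int) : bumpAt [n, h, d] 2 = [n, h, d + 1] := rfl

lemma inv_core (d : PySem.Dict String (List Int)) (s : PySem.Set (String × Int))
    (C : String) (v' : List Int) (g : Int) (hinv : LoadInv d s)
    (hv' : ∃ n h dd : Int, 0 ≤ n ∧ 0 ≤ h ∧ 0 ≤ dd ∧ v' = [n, h, dd] ∧
      ((C, (0:Int)) ∈ PySem.Set.add s (C, g) ↔ (n ≠ 0 ∨ h ≠ 0)) ∧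
      ((C, (1:Int)) ∈ PySem.Set.add s (C, g) ↔ dd ≠ 0) ∧
      tally v' = tally (PySem.Dict.getD d C [0, 0, 0]) + (if (C, g) ∈ s then (0:Int) else 1)) :
    LoadInv (PySem.Dict.insert d C v') (PySem.Set.add s (C, g)) := by
  obtain ⟨n, h, dd, hn, hh, hd, hv, h0, h1, htal⟩ := hv'
  constructor
  · exact PySem.Dict.nodup_keys_insert _ _ _ hinv.hkeys
  · exact PySem.Set.nodup_add _ _ hinv.hnodup
  · intro C' v'' hg
    by_cases hC : C' = C
    · subst hC
      rw [PySem.Dict.get?_insert_self] at hg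
      obtain rfl : v' = v'' := by injection hg
      exact ⟨n, h, dd, hv, hn, hh, hd, h0, h1⟩
    · rw [PySem.Dict.get?_insert_of_ne d _ hC] at hg
      obtain ⟨n', h', dd', hv', hn', hh', hd', h0', h1'⟩ := hinv.hval C' v'' hg
      refine ⟨n', h', dd', hv', hn', hh', hd', ?_, ?_⟩ <;>
        · rw [PySem.Set.mem_add]
          simp only [Prod.mk.injEq, hC, false_and, or_false]
          first | exact h0' | exact h1'
  · intro q hq
    rcases (PySem.Set.mem_add _ _ _).mp hq with hq | rfl
    · rw [PySem.Dict.contains_insert]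
      simp [hinv.hseen q hq]
    · exact PySem.Dict.contains_insert_self _ _ _
  · rw [sumT_insert d C v' hinv.hkeys, len_add, htal, hinv.hsum]
    ring

lemma inv_step (d : PySem.Dict String (List Int)) (s : PySem.Set (String × Int))
    (p : String × String) (hp : p.2 = "normal" ∨ p.2 = "heavy" ∨ p.2 = "delicate")
    (hinv : LoadInv d s) : LoadInv (StepA d p) (StepB s p) := by
  obtain ⟨C, F⟩ := p
  simp only at hp
  have hcon_not : PySem.Dict.get? d C = none → ∀ g : Int, (C, g) ∉ s := by
    intro hnone g hmem
    have := hinv.hseen (C, g) hmem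
    rw [PySem.Dict.get?_eq_none_iff_contains] at hnone
    simp [hnone] at this
  rcases hp with rfl | rfl | rfl
  · -- "normal": idx = 0, bucket g = 0
    show LoadInv (PySem.Dict.insert d C (bumpAt (PySem.Dict.getD d C [0,0,0]) 0))
      (PySem.Set.add s (C, 0))
    apply inv_core d s C _ 0 hinv
    rcases hget : PySem.Dict.get? d C with _ | v
    · rw [PySem.Dict.getD_of_get?_eq_none d _ hget]
      refine ⟨1, 0, 0, by norm_num, by norm_num, by norm_num, rfl, ?_, ?_, ?_⟩
      · simp [PySem.Set.mem_add]
      · simp [PySem.Set.mem_add, hcon_not hget 1]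
      · simp [tally, bumpAt_zero, bumpAt_one, bumpAt_two, hcon_not hget 0]
    · obtain ⟨n, h, dd, rfl, hn, hh, hd, h0, h1⟩ := hinv.hval C v hget
      rw [PySem.Dict.getD_of_get?_eq_some d _ hget]
      refine ⟨n + 1, h, dd, by omega, hh, hd, by simp [bumpAt_zero, bumpAt_one, bumpAt_two], ?_, ?_, ?_⟩
      · simp [PySem.Set.mem_add]; omega
      · rw [PySem.Set.mem_add]; simp only [Prod.mk.injEq]; norm_num; exact h1
      · by_cases hm : (C, (0:Int)) ∈ s
        · have := h0.mp hm
          simp only [bumpAt_zero, bumpAt_one, bumpAt_two, tally]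
          split_ifs <;> first | omega | exact (‹False›).elim
        · have := (h0.not.mp hm)
          push Not at this
          simp only [bumpAt_zero, bumpAt_one, bumpAt_two, tally, hm, if_neg hm]
          split_ifs <;> first | omega | exact (‹False›).elim
  · -- "heavy": idx = 1, bucket g = 0
    show LoadInv (PySem.Dict.insert d C (bumpAt (PySem.Dict.getD d C [0,0,0]) 1))
      (PySem.Set.add s (C, 0))
    apply inv_core d s C _ 0 hinv
    rcases hget : PySem.Dict.get? d C with _ | v
    · rw [PySem.Dict.getD_of_get?_eq_none d _ hget]
      refine ⟨0, 1, 0, by norm_num, by norm_num, by norm_num, rfl, ?_, ?_, ?_⟩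
      · simp [PySem.Set.mem_add]
      · simp [PySem.Set.mem_add, hcon_not hget 1]
      · simp [tally, bumpAt_zero, bumpAt_one, bumpAt_two, hcon_not hget 0]
    · obtain ⟨n, h, dd, rfl, hn, hh, hd, h0, h1⟩ := hinv.hval C v hget
      rw [PySem.Dict.getD_of_get?_eq_some d _ hget]
      refine ⟨n, h + 1, dd, hn, by omega, hd, by simp [bumpAt_zero, bumpAt_one, bumpAt_two], ?_, ?_, ?_⟩
      · simp [PySem.Set.mem_add]; omega
      · rw [PySem.Set.mem_add]; simp only [Prod.mk.injEq]; norm_num; exact h1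
      · by_cases hm : (C, (0:Int)) ∈ s
        · have := h0.mp hm
          simp only [bumpAt_zero, bumpAt_one, bumpAt_two, tally]
          split_ifs <;> first | omega | exact (‹False›).elim
        · have := (h0.not.mp hm)
          push Not at this
          simp only [bumpAt_zero, bumpAt_one, bumpAt_two, tally, hm, if_neg hm]
          split_ifs <;> first | omega | exact (‹False›).elim
  · -- "delicate": idx = 2, bucket g = 1
    show LoadInv (PySem.Dict.insert d C (bumpAt (PySem.Dict.getD d C [0,0,0]) 2))
      (PySem.Set.add s (C, 1))
    apply inv_core d s C _ 1 hinv
    rcases hget : PySem.Dict.get? d C with _ | v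
    · rw [PySem.Dict.getD_of_get?_eq_none d _ hget]
      refine ⟨0, 0, 1, by norm_num, by norm_num, by norm_num, rfl, ?_, ?_, ?_⟩
      · simp [PySem.Set.mem_add, hcon_not hget 0]
      · simp [PySem.Set.mem_add]
      · simp [tally, bumpAt_zero, bumpAt_one, bumpAt_two, hcon_not hget 1]
    · obtain ⟨n, h, dd, rfl, hn, hh, hd, h0, h1⟩ := hinv.hval C v hget
      rw [PySem.Dict.getD_of_get?_eq_some d _ hget]
      refine ⟨n, h, dd + 1, hn, hh, by omega, by simp [bumpAt_zero, bumpAt_one, bumpAt_two], ?_, ?_, ?_⟩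
      · rw [PySem.Set.mem_add]; simp only [Prod.mk.injEq]; norm_num; exact h0
      · simp [PySem.Set.mem_add]; omega
      · by_cases hm : (C, (1:Int)) ∈ s
        · have := h1.mp hm
          simp only [bumpAt_zero, bumpAt_one, bumpAt_two, tally]
          split_ifs <;> first | omega | exact (‹False›).elim
        · have := (h1.not.mp hm)
          simp only [bumpAt_zero, bumpAt_one, bumpAt_two, tally, hm, if_neg hm]
          split_ifs <;> first | omega | exact (‹False›).elim

lemma main_loop (load : List (String × String)) (d : PySem.Dict String (List Int))
    (s : PySem.Set (String × Int))
    (hpre : ∀ p ∈ load, p.2 = "normal" ∨ p.2 = "heavy" ∨ p.2 = "delicate")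
    (hinv : LoadInv d s) :
    sumT (load.foldl StepA d) = ((load.foldl StepB s).length : Int) := by
  induction load generalizing d s with
  | nil => exact hinv.hsum
  | cons p t ih =>
    exact ih _ _ (fun q hq => hpre q (List.mem_cons_of_mem _ hq))
      (inv_step d s p (hpre p List.mem_cons_self) hinv)

-- ===== VERDICT (by name: the statement is the Claim_ definition above) =====
theorem minLaundryLoads_spec : Claim_equal_minLaundryLoads := by
  intro load _ hpre
  have hinv : LoadInv PySem.Dict.empty PySem.Set.empty := by
    constructor
    · simp [PySem.Dict.keys, PySem.Dict.empty]
    · simp [PySem.Set.empty]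
    · intro C v h; simp [PySem.Dict.get?, PySem.Dict.empty] at h
    · intro q hq; simp [PySem.Set.empty] at hq
    · simp [sumT, PySem.Dict.values, PySem.Dict.empty]
  have hmain := main_loop load PySem.Dict.empty PySem.Set.empty hpre hinv
  show minLaundryLoads load = minLaundryLoads_alt load
  show List.foldl tallyStep 0
      (PySem.Dict.values (load.foldl StepA PySem.Dict.empty))
    = ((load.foldl StepB PySem.Set.empty).length : Int)
  rw [foldl_tallyStep, zero_add]
  exact hmain
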